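-- pv_equiv track=rewrite | github.com/gyeongjae-ham/algorithm_solve | 백준/Silver/3085. 사탕 게임/사탕 게임.py | check
-- ===== SOURCE A (Python) =====
-- def check(ar):
--     n = len(ar)
--     ans = 1
--
--     for i in range(n):
--         cnt = 1
--         for j in range(1, n):
--             if ar[i][j] == ar[i][j-1]:
--                 cnt += 1
--             else:
--                 cnt = 1
--             ans = max(ans, cnt)
--
--         cnt = 1
--         for j in range(1, n):
--             if ar[j][i] == ar[j-1][i]:
--                 cnt += 1
--             else:
--                 cnt = 1
--             ans = max(ans, cnt)
--     return ans
-- ===== SOURCE B (Python) =====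
-- def check(ar):
--     n = len(ar)
--     rows = [row[:n] for row in ar]
--     cols = [list(c) for c in zip(*rows)]
--     best = 1
--     for line in rows + cols:
--         bps = [0] + [k for k in range(1, n) if line[k] != line[k-1]] + [n]
--         for a, b in zip(bps, bps[1:]):
--             best = max(best, b - a)
--     return best
-- ===== Notes on version B (the rewrite author's own statement) =====
-- stated objective: alternative
-- what changed: Replaces the per-cell running counter reset on mismatch by a segment view: each row and each column (obtained by transposing the truncated square) is cut at its breakpoints (positions where adjacent cells differ) and the answer is the maximum gap between consecutive breakpoints, over all lines.
-- outside the precondition, e.g. on check([[]]): A returns 1, B returns 1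
import Mathlib
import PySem

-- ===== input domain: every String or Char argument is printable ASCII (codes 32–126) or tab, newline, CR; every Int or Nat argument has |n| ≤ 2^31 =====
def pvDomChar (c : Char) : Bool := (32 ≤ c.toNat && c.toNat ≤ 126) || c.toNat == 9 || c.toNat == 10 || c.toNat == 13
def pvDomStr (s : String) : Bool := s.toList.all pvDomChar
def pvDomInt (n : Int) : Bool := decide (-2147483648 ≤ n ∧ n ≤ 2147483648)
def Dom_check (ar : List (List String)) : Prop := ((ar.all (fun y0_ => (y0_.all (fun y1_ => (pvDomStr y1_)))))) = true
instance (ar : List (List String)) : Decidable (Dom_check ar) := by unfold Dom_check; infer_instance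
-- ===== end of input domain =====

-- B replaces A's per-cell run counter by a breakpoint/gap scan over rows and transposed columns (alternative decomposition, same cost).


-- ===== PORT A =====
def check (ar : List (List String)) : Int :=
  let n : Int := ar.length
  (PySem.List.pyRange 0 n 1).foldl (fun ans i =>
    let r := (PySem.List.pyRange 1 n 1).foldl (fun (p : Int × Int) j =>
        let cnt : Int := if PySem.List.pyGetD (PySem.List.pyGetD ar i []) j ""
                          == PySem.List.pyGetD (PySem.List.pyGetD ar i []) (j-1) "" then p.2 + 1 else 1
        (max p.1 cnt, cnt)) (ans, 1)
    let c := (PySem.List.pyRange 1 n 1).foldl (fun (p : Int × Int) j =>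
        let cnt : Int := if PySem.List.pyGetD (PySem.List.pyGetD ar j []) i ""
                          == PySem.List.pyGetD (PySem.List.pyGetD ar (j-1) []) i "" then p.2 + 1 else 1
        (max p.1 cnt, cnt)) (r.1, 1)
    c.1) 1

-- ===== PORT B =====
-- zip(*rows) then list(c): length = min of the row lengths, column k in row order (getD is exact: k < every length)
def pyZipStar (rows : List (List String)) : List (List String) :=
  match rows with
  | [] => []
  | r :: rs =>
    (List.range (rs.foldl (fun m l => min m l.length) r.length)).map
      (fun k => rows.map (fun row => row.getD k ""))

def check_alt (ar : List (List String)) : Int :=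
  let n : Int := ar.length
  let rows := ar.map (fun row => row.take n.toNat)   -- row[:n], exact since n ≥ 0
  let cols := pyZipStar rows
  (rows ++ cols).foldl (fun best line =>
    let bps : List Int :=
      (0 :: (PySem.List.pyRange 1 n 1).filter
        (fun k => !(PySem.List.pyGetD line k "" == PySem.List.pyGetD line (k-1) ""))) ++ [n]
    (bps.zip bps.tail).foldl (fun b pr => max b (pr.2 - pr.1)) best) 1

-- ===== PRECONDITION & SPEC =====
-- Pre_ excludes the ragged inputs with a row shorter than len(ar): for len(ar) >= 2 A raises IndexError there (B raises too);
-- in the degenerate len(ar) = 1 ragged case (e.g. [[]]) no cell is ever compared and both programs return 1.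
def Pre_check (ar : List (List String)) : Prop := ∀ row ∈ ar, ar.length ≤ row.length
instance (ar : List (List String)) : Decidable (Pre_check ar) := by unfold Pre_check; infer_instance
def pvWitness_check : List (List String) := [["a", "b"], ["b", "b"]]
def Spec_check (ar : List (List String)) (out : Int) : Prop := out = check_alt ar
instance (ar : List (List String)) (out : Int) : Decidable (Spec_check ar out) := by unfold Spec_check; infer_instance

-- ===== CLAIM (what is proved, stated in full; the proofs are below) =====
def Claim_equal_check : Prop := ∀ (ar : List (List String)), Dom_check ar → Pre_check ar → Spec_check ar (check ar)

-- ===== LEMMAS AND PROOFS =====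

-- adjacent-equality test of a line, as B's breakpoint filter reads it
def eqL (line : List String) (k : Int) : Bool :=
  PySem.List.pyGetD line k "" == PySem.List.pyGetD line (k-1) ""

-- one step of A's inner counter loop
def stepA (eq : Int → Bool) (p : Int × Int) (j : Int) : Int × Int :=
  let cnt : Int := if eq j then p.2 + 1 else 1
  (max p.1 cnt, cnt)

-- B's gap fold over a breakpoint list
def gapF (best : Int) (bps : List Int) : Int :=
  (bps.zip bps.tail).foldl (fun b pr => max b (pr.2 - pr.1)) best

-- B's breakpoint positions for a given adjacent-equality test
def bpsOf (eq : Int → Bool) (n : Int) : List Int :=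
  (PySem.List.pyRange 1 n 1).filter (fun k => !(eq k))

-- value of one line: max gap between consecutive breakpoints
def vL (n : Int) (eq : Int → Bool) : Int :=
  gapF 1 ((0 :: bpsOf eq n) ++ [n])

lemma foldl_maxf_max {α : Type} (f : α → Int) :
    ∀ (l : List α) (a b : Int),
      l.foldl (fun acc x => max acc (f x)) (max a b)
        = max a (l.foldl (fun acc x => max acc (f x)) b) := by
  intro l
  induction l with
  | nil => intro a b; rfl
  | cons x t ih =>
    intro a b
    simp only [List.foldl_cons, max_assoc]
    exact ih a (max b (f x))

lemma foldl_maxf_out {α : Type} (f : α → Int) (l : List α) (b c : Int) :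
    l.foldl (fun acc x => max acc (f x)) (max b c)
      = max (l.foldl (fun acc x => max acc (f x)) b) c := by
  rw [max_comm b c, foldl_maxf_max, max_comm]

lemma gapF_max (a b : Int) (bps : List Int) :
    gapF (max a b) bps = max a (gapF b bps) := by
  simp only [gapF]
  exact foldl_maxf_max (fun pr : Int × Int => pr.2 - pr.1) _ a b

lemma gapF_eq_max_v (acc : Int) (bps : List Int) (h : 1 ≤ acc) :
    gapF acc bps = max acc (gapF 1 bps) := by
  rw [← gapF_max, max_eq_left h]

lemma gapF_concat (y : Int) : ∀ (xs : List Int) (x best : Int),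
    gapF best ((x :: xs) ++ [y])
      = max (gapF best (x :: xs)) (y - (x :: xs).getLastD 0) := by
  intro xs
  induction xs with
  | nil => intro x best; simp [gapF]
  | cons x' t ih =>
    intro x best
    have h1 := ih x' (max best (x' - x))
    simp only [gapF, List.cons_append, List.zip_cons_cons, List.tail_cons, List.foldl_cons] at h1 ⊢
    rw [h1]
    simp

lemma gapF_snoc (best x y : Int) (xs : List Int) :
    gapF best (x :: (xs ++ [y])) = max (gapF best (x :: xs)) (y - (x :: xs).getLastD 0) := by
  rw [← List.cons_append]
  exact gapF_concat y xs x best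

-- A's counter loop over range(1, n) seen through B's gap view: first component is the gap
-- fold over the breakpoints closed by n, second is the current run length n - last breakpoint.
lemma lineA (eq : Int → Bool) :
    ∀ (n : Nat), 1 ≤ n → ∀ (acc : Int), 1 ≤ acc →
      (PySem.List.pyRange 1 (n : Int) 1).foldl (stepA eq) (acc, 1)
        = (gapF acc ((0 :: bpsOf eq (n : Int)) ++ [(n : Int)]),
           (n : Int) - ((0 : Int) :: bpsOf eq (n : Int)).getLastD 0) := by
  intro n hn
  induction n, hn using Nat.le_induction with
  | base =>
    intro acc hacc
    simp [bpsOf, gapF, max_eq_left hacc, PySem.List.pyRange_one_eq_nil]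
  | succ n hn ih =>
    intro acc hacc
    have hcast : ((n + 1 : Nat) : Int) = (n : Int) + 1 := by push_cast; ring
    have hsplit : PySem.List.pyRange 1 ((n : Int) + 1) 1
        = PySem.List.pyRange 1 (n : Int) 1 ++ [(n : Int)] :=
      PySem.List.pyRange_one_succ_right (by exact_mod_cast hn)
    have hbps : bpsOf eq ((n : Int) + 1)
        = bpsOf eq (n : Int) ++ (if !(eq (n : Int)) then [(n : Int)] else []) := by
      by_cases hb : eq (n : Int) <;>
        simp [bpsOf, hsplit, List.filter_append, hb]
    rw [hcast, hsplit, List.foldl_append, ih acc hacc, hbps]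
    by_cases hb : eq (n : Int)
    · -- no breakpoint at n: same breakpoint list, current run grows by 1
      simp only [hb, Bool.not_true, Bool.false_eq_true, if_false, List.append_nil,
        List.foldl_cons, List.foldl_nil, stepA, if_true, List.cons_append]
      rw [gapF_snoc acc 0 ((n : Int)) (bpsOf eq (n : Int)),
        gapF_snoc acc 0 ((n : Int) + 1) (bpsOf eq (n : Int))]
      simp only [Prod.mk.injEq]
      constructor <;> omega
    · -- breakpoint at n: previous run is closed, current run restarts at length 1
      simp only [hb, List.foldl_cons, List.foldl_nil, stepA, Bool.false_eq_true, if_false,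
        Bool.not_false, if_true, List.cons_append]
      have hl : (((0 : Int)) :: (bpsOf eq (n : Int) ++ [(n : Int)])).getLastD 0 = (n : Int) := by
        rw [show ((0 : Int) :: (bpsOf eq (n : Int) ++ [(n : Int)]))
            = (((0 : Int) :: bpsOf eq (n : Int)) ++ [(n : Int)]) from rfl]
        exact List.getLastD_concat
      rw [gapF_snoc acc 0 ((n : Int) + 1) (bpsOf eq (n : Int) ++ [(n : Int)]), hl]
      simp only [Prod.mk.injEq]
      constructor <;> omega

lemma foldl_body_max {β : Type} (body : Int → β → Int) (f : β → Int) :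
    ∀ (l : List β), (∀ acc, 1 ≤ acc → ∀ i ∈ l, body acc i = max acc (f i)) →
      ∀ (acc : Int), 1 ≤ acc →
        l.foldl body acc = l.foldl (fun a i => max a (f i)) acc := by
  intro l
  induction l with
  | nil => intro _ _ _; rfl
  | cons x t ih =>
    intro hbody acc hacc
    rw [List.foldl_cons, List.foldl_cons, hbody acc hacc x List.mem_cons_self]
    exact ih (fun a ha i hi => hbody a ha i (List.mem_cons_of_mem x hi))
      (max acc (f x)) (le_trans hacc (le_max_left _ _))

lemma foldl_split_max {β : Type} (f g : β → Int) :
    ∀ (l : List β) (acc : Int),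
      l.foldl (fun a i => max a (max (f i) (g i))) acc
        = l.foldl (fun a i => max a (g i)) (l.foldl (fun a i => max a (f i)) acc) := by
  intro l
  induction l with
  | nil => intro _; rfl
  | cons x t ih =>
    intro acc
    simp only [List.foldl_cons]
    rw [ih, show max acc (max (f x) (g x)) = max (max acc (f x)) (g x) from
      (max_assoc acc (f x) (g x)).symm, foldl_maxf_out]

lemma self_eq_map_range_getD {α : Type} (d : α) (l : List α) :
    l = (List.range l.length).map (fun k => l.getD k d) := by
  apply List.ext_getElem
  · simp
  · intro i h1 h2
    simp [List.getD, List.getElem?_eq_getElem h1]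

lemma foldl_min_len {α : Type} (N : Nat) :
    ∀ (rs : List (List α)), (∀ l ∈ rs, l.length = N) →
      rs.foldl (fun m l => min m l.length) N = N := by
  intro rs
  induction rs with
  | nil => intro _; rfl
  | cons r t ih =>
    intro h
    rw [List.foldl_cons, h r List.mem_cons_self, min_self]
    exact ih (fun l hl => h l (List.mem_cons_of_mem r hl))

-- the row line B reads: row k of ar truncated to the square
def rowL (ar : List (List String)) (k : Nat) : List String :=
  (ar.getD k []).take ar.length

-- the column line B reads: entry k of every truncated row
def colL (ar : List (List String)) (k : Nat) : List String :=
  (ar.map (fun row => row.take ar.length)).map (fun row => row.getD k "")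

lemma acc_row (ar : List (List String)) (hpre : Pre_check ar) (k : Nat)
    (hk : k < ar.length) (j : Int) (h0 : 0 ≤ j) (hj : j < (ar.length : Int)) :
    PySem.List.pyGetD (PySem.List.pyGetD ar (k : Int) []) j ""
      = PySem.List.pyGetD (rowL ar k) j "" := by
  have hmem : ar.getD k [] ∈ ar := by
    rw [List.getD_eq_getElem ar [] hk]
    exact List.getElem_mem hk
  have hlen : ar.length ≤ (ar.getD k []).length := hpre _ hmem
  have h1 : PySem.List.pyGetD ar (k : Int) [] = ar.getD k [] := by
    simp [PySem.List.pyGetD_natCast]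
  rw [h1]
  have hjlen : j < ((ar.getD k []).length : Int) := lt_of_lt_of_le hj (by exact_mod_cast hlen)
  have htlen : j < (((ar.getD k []).take ar.length).length : Int) := by
    simp only [List.length_take]
    omega
  rw [PySem.List.pyGetD_eq_getElem _ _ h0 hjlen,
    rowL, PySem.List.pyGetD_eq_getElem _ _ h0 htlen, List.getElem_take]

lemma acc_col (ar : List (List String)) (hpre : Pre_check ar) (k : Nat)
    (hk : k < ar.length) (j : Int) (h0 : 0 ≤ j) (hj : j < (ar.length : Int)) :
    PySem.List.pyGetD (PySem.List.pyGetD ar j []) (k : Int) ""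
      = PySem.List.pyGetD (colL ar k) j "" := by
  have hjn : j.toNat < ar.length := by omega
  have hlen : ar.length ≤ ar[j.toNat].length := hpre _ (List.getElem_mem hjn)
  have e1 : PySem.List.pyGetD ar j [] = ar[j.toNat] :=
    PySem.List.pyGetD_eq_getElem ar [] h0 (by exact_mod_cast hj)
  have e2 : PySem.List.pyGetD ar[j.toNat] (k : Int) "" = ar[j.toNat][k]'(by omega) := by
    rw [PySem.List.pyGetD_natCast, List.getD_eq_getElem]
  have hclen : (colL ar k).length = ar.length := by simp [colL]
  have e3 : PySem.List.pyGetD (colL ar k) j "" = (colL ar k)[j.toNat]'(by omega) :=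
    PySem.List.pyGetD_eq_getElem _ _ h0 (by rw [hclen]; exact_mod_cast hj)
  rw [e1, e2, e3]
  have e4 : (colL ar k)[j.toNat]'(by omega) = (ar[j.toNat].take ar.length).getD k "" := by
    simp [colL]
  rw [e4]
  have hkt : k < (ar[j.toNat].take ar.length).length := by
    simp only [List.length_take]
    omega
  rw [List.getD_eq_getElem _ _ hkt, List.getElem_take]

lemma rowfold_eq (ar : List (List String)) (hpre : Pre_check ar) (k : Nat)
    (hk : k < ar.length) (acc : Int) (hacc : 1 ≤ acc) :
    ((PySem.List.pyRange 1 (ar.length : Int) 1).foldl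
      (fun (p : Int × Int) j =>
        let cnt : Int := if PySem.List.pyGetD (PySem.List.pyGetD ar (k : Int) []) j ""
              == PySem.List.pyGetD (PySem.List.pyGetD ar (k : Int) []) (j-1) "" then p.2 + 1 else 1
        (max p.1 cnt, cnt)) (acc, 1)).1
      = max acc (vL (ar.length : Int) (eqL (rowL ar k))) := by
  have hcong := PySem.List.foldl_congr_mem (PySem.List.pyRange 1 (ar.length : Int) 1)
    (fun (p : Int × Int) j =>
        let cnt : Int := if PySem.List.pyGetD (PySem.List.pyGetD ar (k : Int) []) j ""
              == PySem.List.pyGetD (PySem.List.pyGetD ar (k : Int) []) (j-1) "" then p.2 + 1 else 1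
        (max p.1 cnt, cnt))
    (stepA (eqL (rowL ar k))) (acc, 1) ?_
  · rw [hcong, lineA (eqL (rowL ar k)) ar.length (by omega) acc hacc]
    rw [show gapF acc ((0 :: bpsOf (eqL (rowL ar k)) (ar.length : Int)) ++ [(ar.length : Int)])
        = max acc (vL (ar.length : Int) (eqL (rowL ar k))) from gapF_eq_max_v _ _ hacc]
  · intro p j hj
    obtain ⟨hj1, hj2⟩ := PySem.List.mem_pyRange_one.mp hj
    simp only [stepA, eqL]
    rw [acc_row ar hpre k hk j (by omega) hj2,
      acc_row ar hpre k hk (j-1) (by omega) (by omega)]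
    rfl

lemma colfold_eq (ar : List (List String)) (hpre : Pre_check ar) (k : Nat)
    (hk : k < ar.length) (acc : Int) (hacc : 1 ≤ acc) :
    ((PySem.List.pyRange 1 (ar.length : Int) 1).foldl
      (fun (p : Int × Int) j =>
        let cnt : Int := if PySem.List.pyGetD (PySem.List.pyGetD ar j []) (k : Int) ""
              == PySem.List.pyGetD (PySem.List.pyGetD ar (j-1) []) (k : Int) "" then p.2 + 1 else 1
        (max p.1 cnt, cnt)) (acc, 1)).1
      = max acc (vL (ar.length : Int) (eqL (colL ar k))) := by
  have hcong := PySem.List.foldl_congr_mem (PySem.List.pyRange 1 (ar.length : Int) 1)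
    (fun (p : Int × Int) j =>
        let cnt : Int := if PySem.List.pyGetD (PySem.List.pyGetD ar j []) (k : Int) ""
              == PySem.List.pyGetD (PySem.List.pyGetD ar (j-1) []) (k : Int) "" then p.2 + 1 else 1
        (max p.1 cnt, cnt))
    (stepA (eqL (colL ar k))) (acc, 1) ?_
  · rw [hcong, lineA (eqL (colL ar k)) ar.length (by omega) acc hacc]
    rw [show gapF acc ((0 :: bpsOf (eqL (colL ar k)) (ar.length : Int)) ++ [(ar.length : Int)])
        = max acc (vL (ar.length : Int) (eqL (colL ar k))) from gapF_eq_max_v _ _ hacc]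
  · intro p j hj
    obtain ⟨hj1, hj2⟩ := PySem.List.mem_pyRange_one.mp hj
    simp only [stepA, eqL]
    rw [acc_col ar hpre k hk j (by omega) hj2,
      acc_col ar hpre k hk (j-1) (by omega) (by omega)]
    rfl

lemma a_eq (ar : List (List String)) (hpre : Pre_check ar) :
    check ar = (List.range ar.length).foldl
      (fun a k => max a (max (vL (ar.length : Int) (eqL (rowL ar k)))
                             (vL (ar.length : Int) (eqL (colL ar k))))) 1 := by
  simp only [check]
  rw [PySem.List.pyRange_zero_natCast, List.foldl_map]
  refine foldl_body_max _ _ _ ?_ 1 le_rfl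
  intro acc hacc k hkmem
  have hk : k < ar.length := List.mem_range.mp hkmem
  rw [rowfold_eq ar hpre k hk acc hacc,
    colfold_eq ar hpre k hk (max acc (vL (ar.length : Int) (eqL (rowL ar k))))
      (le_trans hacc (le_max_left _ _)),
    max_assoc]

lemma alt_eq (ar : List (List String)) (hpre : Pre_check ar) :
    check_alt ar = (List.range ar.length).foldl
      (fun a k => max a (vL (ar.length : Int) (eqL (colL ar k))))
      ((List.range ar.length).foldl
        (fun a k => max a (vL (ar.length : Int) (eqL (rowL ar k)))) 1) := by
  simp only [check_alt, Int.toNat_natCast]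
  rw [foldl_body_max
    (fun best line =>
      let bps : List Int :=
        (0 :: (PySem.List.pyRange 1 (ar.length : Int) 1).filter
          (fun k => !(PySem.List.pyGetD line k "" == PySem.List.pyGetD line (k-1) ""))) ++
          [(ar.length : Int)]
      (bps.zip bps.tail).foldl (fun b pr => max b (pr.2 - pr.1)) best)
    (fun line => vL (ar.length : Int) (eqL line)) _ ?_ 1 le_rfl]
  · rw [List.foldl_append]
    have hzip : pyZipStar (ar.map (fun row => row.take ar.length))
        = (List.range ar.length).map (fun k => colL ar k) := by
      cases ar with
      | nil => rfl
      | cons r0 rest =>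
        simp only [List.map_cons, pyZipStar]
        have h0 : (r0.take (r0 :: rest).length).length = (r0 :: rest).length := by
          have := hpre r0 List.mem_cons_self
          simp only [List.length_take]
          omega
        rw [h0, foldl_min_len ((r0 :: rest).length) (rest.map (fun row => row.take (r0 :: rest).length))
          (by
            intro l hl
            obtain ⟨row, hrow, rfl⟩ := List.mem_map.mp hl
            have := hpre row (List.mem_cons_of_mem r0 hrow)
            simp only [List.length_take]
            omega)]
        rfl
    rw [hzip, List.foldl_map]
    have hrows : (ar.map (fun row => row.take ar.length)).foldl
        (fun a line => max a (vL (ar.length : Int) (eqL line))) 1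
        = (List.range ar.length).foldl
          (fun a k => max a (vL (ar.length : Int) (eqL (rowL ar k)))) 1 := by
      conv_lhs => rw [self_eq_map_range_getD [] (ar.map (fun row => row.take ar.length))]
      rw [List.foldl_map, List.length_map]
      refine PySem.List.foldl_congr_mem _ _ _ _ ?_
      intro a k hkmem
      have hk : k < ar.length := List.mem_range.mp hkmem
      have he : (ar.map (fun row => row.take ar.length)).getD k [] = rowL ar k := by
        rw [List.getD_eq_getElem _ _ (by simpa using hk), List.getElem_map, rowL,
          List.getD_eq_getElem ar [] hk]
      rw [he]
    rw [hrows]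
  · intro acc hacc line _
    show gapF acc ((0 :: bpsOf (eqL line) (ar.length : Int)) ++ [(ar.length : Int)])
      = max acc (vL (ar.length : Int) (eqL line))
    rw [gapF_eq_max_v _ _ hacc]
    rfl

-- ===== VERDICT (by name: the statement is the Claim_ definition above) =====
theorem check_spec : Claim_equal_check := by
  intro ar _ hpre
  unfold Spec_check
  rw [a_eq ar hpre, alt_eq ar hpre, foldl_split_max]
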